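-- pv_equiv track=rewrite | github.com/talni/Detection-of-Groups-with-Biased-Representation-in-Ranking | Coding/Algorithms/IterTD_GlobalBounds.py | A_is_ancestor_of_B_string
-- ===== SOURCE A (Python) =====
-- def A_is_ancestor_of_B_string(a, b):
--     if len(a) >= len(b):
--         return False
--     length = len(a)  # len(b) should >= len(a)
--     find_undeterministic = False
--     i = 0
--     for i in range(length):
--         if a[i] != b[i]:
--             if a[i] != "|":
--                 return False
--             else:
--                 find_undeterministic = True
--                 break
--     for j in range(i, length):
--         if a[j] != "|":
--             return False
--     return True
-- ===== SOURCE B (Python) =====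
-- def A_is_ancestor_of_B_string(a, b):
--     if len(a) >= len(b):
--         return False
--     k = len(a)
--     while k > 0 and a[k - 1] == "|":
--         k -= 1
--     return a[:k] == b[:k]
-- ===== Notes on version B (the rewrite author's own statement) =====
-- stated objective: simpler
-- what changed: Instead of scanning left-to-right with a mismatch flag and a second suffix loop, B strips the trailing run of '|' wildcards off a (a right-to-left scan) and checks that the remaining stem is a literal prefix of b.
-- intended difference: When a is a nonempty proper prefix of b whose last character is not '|', A returns False (its leftover loop index i makes it re-check a's last character against '|') while B returns True, the intended value since a literally is an ancestor prefix of b. — e.g. on A_is_ancestor_of_B_string("x", "xy"): A returns false, B returns true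
import Mathlib
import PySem

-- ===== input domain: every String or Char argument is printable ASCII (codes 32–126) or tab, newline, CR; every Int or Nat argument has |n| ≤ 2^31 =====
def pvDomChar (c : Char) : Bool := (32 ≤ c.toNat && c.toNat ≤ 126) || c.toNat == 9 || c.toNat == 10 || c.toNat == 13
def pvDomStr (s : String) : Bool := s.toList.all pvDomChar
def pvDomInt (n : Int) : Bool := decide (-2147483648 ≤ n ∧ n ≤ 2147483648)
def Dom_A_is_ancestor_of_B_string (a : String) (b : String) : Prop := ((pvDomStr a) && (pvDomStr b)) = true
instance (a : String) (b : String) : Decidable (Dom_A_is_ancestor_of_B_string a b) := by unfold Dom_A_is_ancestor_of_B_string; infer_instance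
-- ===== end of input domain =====

-- B strips the trailing '|'-wildcard run off a and checks the remaining stem is a literal
-- prefix of b (objective: simpler); A and B differ only on the D_ inputs stated below.

-- ===== PORT A =====
-- first for-loop: none = "return False"; some i = loop left index i
-- (break at the mismatch index, or i = length-1 / 0 after a full pass, as in Python).
-- Indices are always < la.length ≤ lb.length here, so getD is exact.
def pvAScan (la lb : List Char) (i : Nat) : Option Nat :=
  if i < la.length then
    if la.getD i ' ' == lb.getD i ' ' then pvAScan la lb (i + 1)
    else if la.getD i ' ' == '|' then some i
    else none
  else some (la.length - 1)
termination_by la.length - i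

-- second for-loop: for j in range(i, length): a[j] must be '|'
def pvASuffix (la : List Char) (j : Nat) : Bool :=
  if j < la.length then
    if la.getD j ' ' == '|' then pvASuffix la (j + 1) else false
  else true
termination_by la.length - j

def A_is_ancestor_of_B_string (a : String) (b : String) : Bool :=
  let la := a.toList
  let lb := b.toList
  if la.length ≥ lb.length then false
  else
    match pvAScan la lb 0 with
    | none => false
    | some i => pvASuffix la i

-- ===== PORT B =====
-- while k > 0 and a[k-1] == '|': k -= 1   (k-1 < la.length, so getD is exact)
def pvBStrip (la : List Char) (k : Nat) : Nat :=
  if 0 < k then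
    if la.getD (k - 1) ' ' == '|' then pvBStrip la (k - 1) else k
  else 0
termination_by k

def A_is_ancestor_of_B_string_alt (a : String) (b : String) : Bool :=
  let la := a.toList
  let lb := b.toList
  if la.length ≥ lb.length then false
  else
    let k := pvBStrip la la.length
    la.take k == lb.take k

-- ===== PRECONDITION & SPEC =====
-- When a is a nonempty proper prefix of b whose last character is not '|', A returns False
-- (its leftover loop index makes it re-check a's last character against '|') while B returns
-- True, the intended value since a literally is an ancestor prefix of b.
def D_A_is_ancestor_of_B_string (a : String) (b : String) : Prop :=
  a.toList.length < b.toList.length ∧ a.toList ≠ [] ∧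
  b.toList.take a.toList.length = a.toList ∧ a.toList.getLast? ≠ some '|'
instance (a : String) (b : String) : Decidable (D_A_is_ancestor_of_B_string a b) := by
  unfold D_A_is_ancestor_of_B_string; infer_instance

def Spec_A_is_ancestor_of_B_string (a : String) (b : String) (out : Bool) : Prop :=
  ¬ D_A_is_ancestor_of_B_string a b → out = A_is_ancestor_of_B_string_alt a b
instance (a : String) (b : String) (out : Bool) : Decidable (Spec_A_is_ancestor_of_B_string a b out) := by
  unfold Spec_A_is_ancestor_of_B_string; infer_instance

def pvDiffWitness_A_is_ancestor_of_B_string : String × String := ("x", "xy")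
def pvDiffWitnessOut_A_is_ancestor_of_B_string : Bool × Bool := (false, true)

-- ===== CLAIM (what is proved, stated in full; the proofs are below) =====
def Claim_unchanged_A_is_ancestor_of_B_string : Prop := ∀ (a : String) (b : String), Dom_A_is_ancestor_of_B_string a b → Spec_A_is_ancestor_of_B_string a b (A_is_ancestor_of_B_string a b)
def Claim_changed_A_is_ancestor_of_B_string : Prop := Dom_A_is_ancestor_of_B_string (pvDiffWitness_A_is_ancestor_of_B_string.1) (pvDiffWitness_A_is_ancestor_of_B_string.2) ∧ D_A_is_ancestor_of_B_string (pvDiffWitness_A_is_ancestor_of_B_string.1) (pvDiffWitness_A_is_ancestor_of_B_string.2) ∧ A_is_ancestor_of_B_string (pvDiffWitness_A_is_ancestor_of_B_string.1) (pvDiffWitness_A_is_ancestor_of_B_string.2) = pvDiffWitnessOut_A_is_ancestor_of_B_string.1 ∧ A_is_ancestor_of_B_string_alt (pvDiffWitness_A_is_ancestor_of_B_string.1) (pvDiffWitness_A_is_ancestor_of_B_string.2) = pvDiffWitnessOut_A_is_ancestor_of_B_string.2 ∧ pvDiffWitnessOut_A_is_ancestor_of_B_string.1 ≠ pvDiffW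itnessOut_A_is_ancestor_of_B_string.2
def Claim_exact_A_is_ancestor_of_B_string : Prop := ∀ (a : String) (b : String), Dom_A_is_ancestor_of_B_string a b → D_A_is_ancestor_of_B_string a b → A_is_ancestor_of_B_string a b ≠ A_is_ancestor_of_B_string_alt a b

-- ===== LEMMAS AND PROOFS =====

-- A's first loop, analysed through the common-prefix length (proof-side helper)
def pvLcp (la lb : List Char) (L : Nat) : Nat :=
  if L < la.length && (la.getD L ' ' == lb.getD L ' ') then pvLcp la lb (L + 1) else L
termination_by la.length - L
decreasing_by simp_all; omega

-- A's suffix loop is the all-wildcards test on the dropped suffix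
theorem pvASuffix_eq_all (la : List Char) (j : Nat) :
    pvASuffix la j = (la.drop j).all (fun c => c == '|') := by
  fun_induction pvASuffix la j with
  | case1 j h heq ih =>
      rw [List.getD_eq_getElem la ' ' h] at heq
      rw [List.drop_eq_getElem_cons h, List.all_cons, heq, ih, Bool.true_and]
  | case2 j h heq =>
      rw [List.getD_eq_getElem la ' ' h] at heq
      rw [Bool.not_eq_true] at heq
      rw [List.drop_eq_getElem_cons h, List.all_cons, heq, Bool.false_and]
  | case3 j h =>
      rw [List.drop_eq_nil_of_le (by omega)]
      simp

-- A's scan+suffix from index i equals drop-at-(lcp-or-last) all-wildcards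
theorem pvScan_eq_lcp (la lb : List Char) (i : Nat) :
    (match pvAScan la lb i with
     | none => false
     | some k => pvASuffix la k)
    = (la.drop (if pvLcp la lb i < la.length then pvLcp la lb i else la.length - 1)).all
        (fun c => c == '|') := by
  fun_induction pvAScan la lb i with
  | case1 i h heq ih =>
      rw [pvLcp.eq_def]
      simp only [h, heq, decide_true, Bool.true_and, if_true]
      exact ih
  | case2 i h heq hbar =>
      rw [pvLcp.eq_def]
      rw [Bool.not_eq_true] at heq
      have hne : ¬ (la[i] = lb[i]?.getD ' ') := by
        rw [List.getD_eq_getElem la ' ' h] at heq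
        simpa [List.getD] using heq
      simp [hne, h, pvASuffix_eq_all]
  | case3 i h heq hbar =>
      rw [Bool.not_eq_true] at heq hbar
      rw [List.getD_eq_getElem la ' ' h] at hbar
      have hne : ¬ (la[i]?.getD ' ' = lb[i]?.getD ' ') := by simpa [List.getD] using heq
      have hstop : pvLcp la lb i = i := by
        rw [pvLcp.eq_def, if_neg (by simp [List.getD, hne])]
      rw [hstop, if_pos h, List.drop_eq_getElem_cons h, List.all_cons, hbar, Bool.false_and]
  | case4 i h =>
      rw [pvLcp.eq_def]
      simp [h, pvASuffix_eq_all]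

theorem pvLcp_le (la lb : List Char) (L : Nat) (h : L ≤ la.length) :
    L ≤ pvLcp la lb L ∧ pvLcp la lb L ≤ la.length := by
  fun_induction pvLcp la lb L with
  | case1 L hc ih =>
      simp at hc
      obtain ⟨h1, h2⟩ := ih hc.1
      exact ⟨by omega, h2⟩
  | case2 L hc => exact ⟨le_refl _, h⟩

theorem pvLcp_agree (la lb : List Char) (L : Nat) :
    ∀ i, L ≤ i → i < pvLcp la lb L → la.getD i ' ' = lb.getD i ' ' := by
  fun_induction pvLcp la lb L with
  | case1 L hc ih =>
      intro i h1 h2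
      simp at hc
      rcases Nat.eq_or_lt_of_le h1 with rfl | hlt
      · exact hc.2
      · exact ih i hlt h2
  | case2 L hc => intro i h1 h2; omega

theorem pvLcp_stop (la lb : List Char) (L : Nat) (h : pvLcp la lb L < la.length) :
    la.getD (pvLcp la lb L) ' ' ≠ lb.getD (pvLcp la lb L) ' ' := by
  fun_induction pvLcp la lb L with
  | case1 L hc ih => exact ih h
  | case2 L hc =>
      simp at hc
      intro hne
      exact hc h (by simpa [List.getD] using hne)

theorem pvLcp_full (la lb : List Char) (L : Nat) (hL : L ≤ la.length)
    (hag : ∀ i, L ≤ i → i < la.length → la.getD i ' ' = lb.getD i ' ') :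
    pvLcp la lb L = la.length := by
  fun_induction pvLcp la lb L with
  | case1 L hc ih =>
      simp at hc
      exact ih hc.1 (fun i h1 h2 => hag i (by omega) h2)
  | case2 L hc =>
      simp at hc
      rcases Nat.eq_or_lt_of_le hL with h | h
      · exact h
      · exact absurd (hag L (le_refl _) h) (by simpa using hc h)

theorem pvBStrip_le (la : List Char) (k : Nat) : pvBStrip la k ≤ k := by
  fun_induction pvBStrip la k with
  | case1 k h heq ih => omega
  | case2 k h heq => exact le_refl _
  | case3 k h => omega

theorem pvBStrip_all (la : List Char) (k : Nat) :
    ∀ i, pvBStrip la k ≤ i → i < k → la.getD i ' ' = '|' := by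
  fun_induction pvBStrip la k with
  | case1 k h heq ih =>
      intro i h1 h2
      rcases Nat.lt_or_ge i (k - 1) with hlt | hge
      · exact ih i h1 hlt
      · have : i = k - 1 := by omega
        subst this
        simpa using heq
  | case2 k h heq => intro i h1 h2; omega
  | case3 k h => intro i h1 h2; omega

theorem pvBStrip_last (la : List Char) (k : Nat) (h : 0 < pvBStrip la k) :
    la.getD (pvBStrip la k - 1) ' ' ≠ '|' := by
  fun_induction pvBStrip la k with
  | case1 k hk heq ih => exact ih h
  | case2 k hk heq => simpa using heq
  | case3 k hk => omega

-- list-equality of takes, pointwise via getD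
theorem take_eq_iff (la lb : List Char) (k : Nat) (hka : k ≤ la.length) (hkb : k ≤ lb.length) :
    la.take k = lb.take k ↔ ∀ i, i < k → la.getD i ' ' = lb.getD i ' ' := by
  constructor
  · intro h i hi
    have := congrArg (fun l => l.getD i ' ') h
    simpa [List.getD_eq_getElem?_getD, List.getElem?_take, hi] using this
  · intro h
    apply List.ext_getElem
    · simp; omega
    · intro i h1 h2
      have hi : i < k := by simp at h1; omega
      have := h i hi
      rw [List.getD_eq_getElem la ' ' (by omega), List.getD_eq_getElem lb ' ' (by omega)] at this
      simpa [List.getElem_take] using this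

theorem drop_all_iff (la : List Char) (p : Nat) :
    ((la.drop p).all (fun c => c == '|') = true) ↔
      ∀ i, p ≤ i → i < la.length → la.getD i ' ' = '|' := by
  rw [List.all_eq_true]
  constructor
  · intro h i h1 h2
    have hm : la.getD i ' ' ∈ la.drop p := by
      rw [List.getD_eq_getElem la ' ' h2]
      rw [List.mem_iff_getElem]
      refine ⟨i - p, by simp; omega, ?_⟩
      rw [List.getElem_drop]
      congr 1; omega
    simpa using h _ hm
  · intro h c hc
    rw [List.mem_iff_getElem] at hc
    obtain ⟨j, hj, rfl⟩ := hc
    rw [List.getElem_drop]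
    simp only [List.length_drop] at hj
    have hh := h (p + j) (by omega) (by omega)
    rw [List.getD_eq_getElem la ' ' (by omega)] at hh
    simp [hh]

-- getLast? as getD at length-1
theorem getLast?_eq_getD (la : List Char) (h : la ≠ []) :
    la.getLast? = some (la.getD (la.length - 1) ' ') := by
  have hlen : 0 < la.length := List.length_pos_of_ne_nil h
  rw [List.getLast?_eq_getElem?, List.getD_eq_getElem la ' ' (by omega),
    List.getElem?_eq_getElem (by omega)]

-- the core: outside D_, A's drop-all form equals B's strip-and-compare form
theorem core_eq (la lb : List Char) (hlen : la.length < lb.length)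
    (hnd : la ≠ [] → lb.take la.length = la → la.getD (la.length - 1) ' ' = '|') :
    (la.drop (if pvLcp la lb 0 < la.length then pvLcp la lb 0 else la.length - 1)).all
        (fun c => c == '|')
    = (la.take (pvBStrip la la.length) == lb.take (pvBStrip la la.length)) := by
  set L := pvLcp la lb 0 with hLdef
  set k := pvBStrip la la.length with hkdef
  obtain ⟨-, hLle⟩ := pvLcp_le la lb 0 (Nat.zero_le _)
  have hkle : k ≤ la.length := pvBStrip_le la la.length
  have hkall := pvBStrip_all la la.length
  have hagree := pvLcp_agree la lb 0
  have htk := take_eq_iff la lb k hkle (by omega)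
  by_cases hLfull : L < la.length
  · have hstop := pvLcp_stop la lb 0 hLfull
    rw [if_pos hLfull]
    by_cases hk : k ≤ L
    · -- both true
      rw [(drop_all_iff la L).2 (fun i h1 h2 => hkall i (by omega) h2)]
      rw [eq_comm, beq_iff_eq, htk.2 (fun i hi => hagree i (Nat.zero_le _) (by omega))]
    · -- both false
      have hA : ¬ ∀ i, L ≤ i → i < la.length → la.getD i ' ' = '|' := by
        intro hall
        exact pvBStrip_last la la.length (by omega) (hall (k - 1) (by omega) (by omega))
      have hB : ¬ la.take k = lb.take k := by
        intro hteq
        exact hstop (htk.1 hteq L (by omega))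
      have h1 : ((la.drop L).all (fun c => c == '|')) = false := by
        rw [Bool.eq_false_iff]
        intro h; exact hA ((drop_all_iff la L).1 h)
      have h2 : (la.take k == lb.take k) = false := by
        rw [beq_eq_false_iff_ne]; exact hB
      rw [h1, h2]
  · -- L = la.length: full common prefix
    have hLeq : L = la.length := by omega
    rw [if_neg hLfull]
    rcases eq_or_ne la [] with rfl | hne
    · simp [k, pvBStrip]
    · have hpre : lb.take la.length = la := by
        have := (take_eq_iff la lb la.length (le_refl _) (by omega)).2
          (fun i hi => hagree i (Nat.zero_le _) (by omega))
        rw [List.take_length] at this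
        exact this.symm
      have hlast := hnd hne hpre
      have hpos : 0 < la.length := List.length_pos_of_ne_nil hne
      have hkle' : k ≤ la.length - 1 := by
        by_contra hgt
        have hk' : k = la.length := by omega
        exact pvBStrip_last la la.length (by omega) (by rw [← hkdef, hk']; exact hlast)
      rw [(drop_all_iff la (la.length - 1)).2 (fun i h1 h2 => by
        have : i = la.length - 1 := by omega
        rw [this]; exact hlast)]
      rw [eq_comm, beq_iff_eq, htk.2 (fun i hi => hagree i (Nat.zero_le _) (by omega))]

-- on D_: A returns false, B returns true
theorem pvA_false_on_D (a b : String) (hd : D_A_is_ancestor_of_B_string a b) :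
    A_is_ancestor_of_B_string a b = false := by
  obtain ⟨hlen, hne, hpre, hlast⟩ := hd
  have hlastD : a.toList.getD (a.toList.length - 1) ' ' ≠ '|' := by
    intro h
    exact hlast (by rw [getLast?_eq_getD a.toList hne, h])
  have hpos : 0 < a.toList.length := List.length_pos_of_ne_nil hne
  unfold A_is_ancestor_of_B_string
  simp only []
  rw [if_neg (by omega)]
  rw [pvScan_eq_lcp a.toList b.toList 0]
  have hag : ∀ i, 0 ≤ i → i < a.toList.length → a.toList.getD i ' ' = b.toList.getD i ' ' := by
    intro i _ hi
    exact ((take_eq_iff a.toList b.toList a.toList.length (le_refl _) (by omega)).1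
      (by rw [List.take_length]; exact hpre.symm)) i hi
  rw [pvLcp_full a.toList b.toList 0 (Nat.zero_le _) hag]
  rw [if_neg (by omega)]
  rw [Bool.eq_false_iff]
  intro hall
  exact hlastD (((drop_all_iff a.toList (a.toList.length - 1)).1 hall)
    (a.toList.length - 1) (le_refl _) (by omega))

theorem pvB_true_on_D (a b : String) (hd : D_A_is_ancestor_of_B_string a b) :
    A_is_ancestor_of_B_string_alt a b = true := by
  obtain ⟨hlen, hne, hpre, hlast⟩ := hd
  have hlastD : a.toList.getD (a.toList.length - 1) ' ' ≠ '|' := by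
    intro h
    exact hlast (by rw [getLast?_eq_getD a.toList hne, h])
  have hpos : 0 < a.toList.length := List.length_pos_of_ne_nil hne
  unfold A_is_ancestor_of_B_string_alt
  simp only []
  rw [if_neg (by omega)]
  have hk : pvBStrip a.toList a.toList.length = a.toList.length := by
    rw [pvBStrip.eq_def, if_pos hpos, if_neg (by simpa using hlastD)]
  rw [hk, List.take_length, beq_iff_eq, eq_comm]
  exact hpre

-- ===== VERDICT (by name: the statement is the Claim_ definition above) =====
theorem A_is_ancestor_of_B_string_spec : Claim_unchanged_A_is_ancestor_of_B_string := by
  intro a b _ hnd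
  unfold A_is_ancestor_of_B_string A_is_ancestor_of_B_string_alt
  simp only []
  split
  · rfl
  · rename_i hlt
    rw [pvScan_eq_lcp a.toList b.toList 0]
    apply core_eq a.toList b.toList (by omega)
    intro hne hpre
    by_contra hlast
    exact hnd ⟨by omega, hne, hpre, by rw [getLast?_eq_getD a.toList hne]; intro hc; exact hlast (Option.some.inj hc)⟩

theorem A_is_ancestor_of_B_string_changed : Claim_changed_A_is_ancestor_of_B_string := by
  unfold Claim_changed_A_is_ancestor_of_B_string
  refine ⟨by decide, by decide, ?_, ?_, by decide⟩
  · exact pvA_false_on_D _ _ (by decide)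
  · exact pvB_true_on_D _ _ (by decide)

theorem A_is_ancestor_of_B_string_tight : Claim_exact_A_is_ancestor_of_B_string := by
  intro a b _ hd
  rw [pvA_false_on_D a b hd, pvB_true_on_D a b hd]
  simp
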